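-- pv_equiv track=rewrite | github.com/manuel1410/Futoshiki | Futoshiki.py | unir_nombres
-- ===== SOURCE A (Python) =====
-- def unir_nombres(marcas, i, posicion):
--     if marcas == []:
--         return ''
--     elif i >= len(marcas):
--         return ''
--     else:
--         nombre = str(posicion) + '. ' + marcas[i][0]
--         return nombre + '\n' + unir_nombres(marcas, i+1, posicion+1)
-- ===== SOURCE B (Python) =====
-- def unir_nombres(marcas, i, posicion):
--     return ''.join('{}. {}\n'.format(p, fila[0])
--                    for p, fila in enumerate(marcas[i:], posicion))
-- ===== Notes on version B (the rewrite author's own statement) =====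
-- stated objective: simpler
-- what changed: Replaces the guarded index recursion with a single comprehension: slice marcas[i:], enumerate it from posicion, and ''.join the formatted lines.
-- intended difference: For negative i (with marcas nonempty), Python's negative-index wraparound makes A emit the last wrapped rows and then ALL rows again with duplicates (e.g. '1. b\n2. a\n3. b\n'), while B numbers exactly the final segment marcas[i:] ('1. b\n'), the intended reading of 'start at position i'. — e.g. on unir_nombres([["a"], ["b"]], -1, 1): A returns "1. b\n2. a\n3. b\n", B returns "1. b\n"
import Mathlib
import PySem

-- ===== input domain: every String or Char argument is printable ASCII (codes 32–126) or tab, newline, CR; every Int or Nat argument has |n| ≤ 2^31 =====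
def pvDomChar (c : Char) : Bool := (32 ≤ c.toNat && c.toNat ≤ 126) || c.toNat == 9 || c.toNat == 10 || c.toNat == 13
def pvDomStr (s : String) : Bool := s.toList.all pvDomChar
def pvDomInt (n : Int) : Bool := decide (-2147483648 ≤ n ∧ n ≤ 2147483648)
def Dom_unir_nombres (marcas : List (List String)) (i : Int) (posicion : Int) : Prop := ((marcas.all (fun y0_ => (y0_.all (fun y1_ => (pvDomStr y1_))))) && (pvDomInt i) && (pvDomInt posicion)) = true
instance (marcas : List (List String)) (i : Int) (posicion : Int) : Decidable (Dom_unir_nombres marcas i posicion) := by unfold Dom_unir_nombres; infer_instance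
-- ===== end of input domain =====

-- B replaces A's guarded index recursion by a slice + enumerate + join comprehension (objective: simpler);
-- on negative i A's Python wraparound duplicates rows while B numbers exactly the final segment marcas[i:] (see D_).


-- ===== PORT A =====
-- literal port of A's recursion; marcas[i][0] is PySem.List.pyGetD (total under Pre_, which
-- excludes the inputs where Python raises IndexError)
def unir_nombres (marcas : List (List String)) (i : Int) (posicion : Int) : String :=
  if marcas = [] then ""
  else if (marcas.length : Int) ≤ i then ""
  else
    let nombre := PySem.Int.toStr posicion ++ ". " ++
      PySem.List.pyGetD (PySem.List.pyGetD marcas i []) 0 ""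
    nombre ++ "\n" ++ unir_nombres marcas (i + 1) (posicion + 1)
termination_by ((marcas.length : Int) - i).toNat
decreasing_by omega

-- ===== PORT B =====
-- port of Source B: ''.join('{}. {}\n'.format(p, fila[0]) for p, fila in enumerate(marcas[i:], posicion))
def unir_nombres_alt (marcas : List (List String)) (i : Int) (posicion : Int) : String :=
  PySem.Str.join ""
    ((PySem.List.enumerate (PySem.List.slice marcas (some i) none) posicion).map
      (fun pf => PySem.Int.toStr pf.1 ++ ". " ++ PySem.List.pyGetD pf.2 0 "" ++ "\n"))

-- ===== PRECONDITION & SPEC =====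
-- Pre_ excludes exactly the inputs where Python A raises IndexError: a visited row that is empty,
-- or i < -len(marcas) with marcas nonempty (first negative access already out of range).
def Pre_unir_nombres (marcas : List (List String)) (i : Int) (posicion : Int) : Prop :=
  marcas = [] ∨ (marcas.length : Int) ≤ i ∨
    (if i < 0 then -(marcas.length : Int) ≤ i ∧ ∀ r ∈ marcas, r ≠ []
     else ∀ r ∈ marcas.drop i.toNat, r ≠ [])
instance (marcas : List (List String)) (i : Int) (posicion : Int) : Decidable (Pre_unir_nombres marcas i posicion) := by unfold Pre_unir_nombres; infer_instance

def pvWitness_unir_nombres : List (List String) × Int × Int := ([["x"]], 0, 1)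

-- For negative i (with marcas nonempty), Python's negative-index wraparound makes A emit the last
-- wrapped rows and then ALL rows again with duplicates, while B numbers exactly the final segment
-- marcas[i:], the intended reading of "start at position i".
def D_unir_nombres (marcas : List (List String)) (i : Int) (posicion : Int) : Prop :=
  marcas ≠ [] ∧ i < 0 ∧ i < (marcas.length : Int)
instance (marcas : List (List String)) (i : Int) (posicion : Int) : Decidable (D_unir_nombres marcas i posicion) := by unfold D_unir_nombres; infer_instance

def Spec_unir_nombres (marcas : List (List String)) (i : Int) (posicion : Int) (out : String) : Prop :=
  ¬ D_unir_nombres marcas i posicion → out = unir_nombres_alt marcas i posicion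
instance (marcas : List (List String)) (i : Int) (posicion : Int) (out : String) : Decidable (Spec_unir_nombres marcas i posicion out) := by unfold Spec_unir_nombres; infer_instance

def pvDiffWitness_unir_nombres : List (List String) × Int × Int := ([["a"], ["b"]], -1, 1)
def pvDiffWitnessOut_unir_nombres : String × String := ("1. b\n2. a\n3. b\n", "1. b\n")

-- ===== CLAIM (what is proved, stated in full; the proofs are below) =====
def Claim_unchanged_unir_nombres : Prop := ∀ (marcas : List (List String)) (i : Int) (posicion : Int), Dom_unir_nombres marcas i posicion → Pre_unir_nombres marcas i posicion → Spec_unir_nombres marcas i posicion (unir_nombres marcas i posicion)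
def Claim_changed_unir_nombres : Prop := Dom_unir_nombres (pvDiffWitness_unir_nombres.1) (pvDiffWitness_unir_nombres.2.1) (pvDiffWitness_unir_nombres.2.2) ∧ Pre_unir_nombres (pvDiffWitness_unir_nombres.1) (pvDiffWitness_unir_nombres.2.1) (pvDiffWitness_unir_nombres.2.2) ∧ D_unir_nombres (pvDiffWitness_unir_nombres.1) (pvDiffWitness_unir_nombres.2.1) (pvDiffWitness_unir_nombres.2.2) ∧ unir_nombres (pvDiffWitness_unir_nombres.1) (pvDiffWitness_unir_nombres.2.1) (pvDiffWitness_unir_nombres.2.2) = pvDiffWitnessOut_unir_nombres.1 ∧ unir_nombres_alt (pvDiffWitness_unir_nombres.1) (pvDiffWitness_unir_nombres.2.1) (pvDiffWitness_unir_nombres.2.2) = pvDiffWitnessOut_unir_nombres.2 ∧ pvDiffWitnessOut_unir_nombres.1 ≠ pvDiffWitnessOut_unir_nombres.2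
def Claim_exact_unir_nombres : Prop := ∀ (marcas : List (List String)) (i : Int) (posicion : Int), Dom_unir_nombres marcas i posicion → Pre_unir_nombres marcas i posicion → D_unir_nombres marcas i posicion → unir_nombres marcas i posicion ≠ unir_nombres_alt marcas i posicion

-- ===== LEMMAS AND PROOFS =====

-- the formatted line of one enumerated row, and B's whole comprehension body (proof-only helpers)
def pvLine (pf : Int × List String) : String :=
  PySem.Int.toStr pf.1 ++ ". " ++ PySem.List.pyGetD pf.2 0 "" ++ "\n"

def pvBody (l : List (List String)) (p : Int) : String :=
  PySem.Str.join "" ((PySem.List.enumerate l p).map pvLine)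

theorem alt_eq_pvBody (marcas : List (List String)) (i posicion : Int) :
    unir_nombres_alt marcas i posicion = pvBody (PySem.List.slice marcas (some i) none) posicion := rfl

-- ''.join over a cons peels off the first part
theorem joinNil_cons (x : List Char) (xs : List (List Char)) :
    PySem.Chars.join [] (x :: xs) = x ++ PySem.Chars.join [] xs := by
  cases xs <;> simp [PySem.Chars.join, List.intercalate, List.intersperse]

theorem pvBody_nil (p : Int) : pvBody [] p = "" := by
  rw [← String.toList_inj]
  simp [pvBody, PySem.List.enumerate, PySem.Str.toList_join, PySem.Chars.join, List.intercalate]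

-- B's comprehension over a cons produces the first line and recurses with posicion+1
theorem pvBody_cons (x : List String) (l : List (List String)) (p : Int) :
    pvBody (x :: l) p = pvLine (p, x) ++ pvBody l (p + 1) := by
  rw [← String.toList_inj]
  simp [pvBody, pvLine, PySem.List.enumerate_cons, PySem.Str.toList_join, joinNil_cons]

-- every emitted line ends in a newline, so the body of a nonempty list is nonempty
theorem pvBody_ne_empty (marcas : List (List String)) (p : Int) (h : marcas ≠ []) :
    (pvBody marcas p).toList ≠ [] := by
  cases marcas with
  | nil => exact absurd rfl h
  | cons x l =>
    rw [pvBody_cons]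
    simp [pvLine]

-- A on a nonnegative index equals B's comprehension over the dropped tail
theorem unir_eq_body (n : Nat) : ∀ (marcas : List (List String)) (i posicion : Int), 0 ≤ i →
    ((marcas.length : Int) - i).toNat = n →
    unir_nombres marcas i posicion = pvBody (marcas.drop i.toNat) posicion := by
  induction n with
  | zero =>
    intro marcas i posicion hi hn
    have hlen : (marcas.length : Int) ≤ i := by omega
    have hdrop : marcas.drop i.toNat = [] := by
      apply List.drop_eq_nil_of_le; omega
    rw [unir_nombres, hdrop, pvBody_nil]
    simp [hlen]
  | succ n ih =>
    intro marcas i posicion hi hn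
    have hlt : i < (marcas.length : Int) := by omega
    have hne : marcas ≠ [] := by
      intro h; subst h; simp at hlt; omega
    have hidx : i.toNat < marcas.length := by omega
    have hdrop : marcas.drop i.toNat = marcas[i.toNat] :: marcas.drop (i.toNat + 1) :=
      List.drop_eq_getElem_cons hidx
    rw [unir_nombres]
    simp only [hne, if_false, not_le.mpr hlt]
    rw [hdrop, pvBody_cons]
    have hget : PySem.List.pyGetD marcas i [] = marcas[i.toNat] :=
      PySem.List.pyGetD_eq_getElem marcas [] hi hlt
    have htl : (i + 1).toNat = i.toNat + 1 := by omega
    rw [ih marcas (i + 1) (posicion + 1) (by omega) (by omega), htl, hget]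
    rw [← String.toList_inj]
    simp [pvLine]

-- A on a negative in-range index: the wrapped tail, then the whole list over again
theorem unir_neg_eq (k : Nat) : ∀ (marcas : List (List String)) (i posicion : Int), i ≤ 0 →
    -(marcas.length : Int) ≤ i → (-i).toNat = k →
    unir_nombres marcas i posicion =
      pvBody (marcas.drop ((marcas.length : Int) + i).toNat) posicion ++
        pvBody marcas (posicion + (-i)) := by
  induction k with
  | zero =>
    intro marcas i posicion h0 hlo hk
    have hi0 : i = 0 := by omega
    subst hi0
    have hA := unir_eq_body ((marcas.length : Int) - 0).toNat marcas 0 posicion (by omega) rfl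
    have hdrop : marcas.drop ((marcas.length : Int) + 0).toNat = ([] : List (List String)) := by
      apply List.drop_eq_nil_of_le; omega
    rw [hA, hdrop, pvBody_nil]
    rw [← String.toList_inj]
    simp
  | succ k ih =>
    intro marcas i posicion h0 hlo hk
    have hineg : i < 0 := by omega
    have hlen1 : 1 ≤ (marcas.length : Int) := by omega
    have hne : marcas ≠ [] := by
      intro h; subst h; simp at hlen1
    have hlt : i < (marcas.length : Int) := by omega
    have hidx : ((marcas.length : Int) + i).toNat < marcas.length := by omega
    have hget : PySem.List.pyGetD marcas i [] = marcas[((marcas.length : Int) + i).toNat] := by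
      have h1 := PySem.List.pyGetD_neg_natCast marcas (-i).toNat ([] : List String) (by omega) (by omega)
      have h2 : (-(((-i).toNat : Nat) : Int)) = i := by omega
      have hgi : marcas.length - (-i).toNat = ((marcas.length : Int) + i).toNat := by omega
      rw [h2] at h1
      simp only [hgi] at h1
      exact h1
    have hdrop : marcas.drop ((marcas.length : Int) + i).toNat =
        marcas[((marcas.length : Int) + i).toNat] :: marcas.drop (((marcas.length : Int) + i).toNat + 1) :=
      List.drop_eq_getElem_cons hidx
    have htl : ((marcas.length : Int) + i).toNat + 1 = ((marcas.length : Int) + (i + 1)).toNat := by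
      omega
    rw [unir_nombres]
    simp only [hne, if_false, not_le.mpr hlt]
    rw [ih marcas (i + 1) (posicion + 1) (by omega) (by omega) (by omega)]
    rw [hdrop, pvBody_cons, hget, htl]
    have hpos : posicion + 1 + -(i + 1) = posicion + -i := by omega
    rw [hpos]
    rw [← String.toList_inj]
    simp [pvLine]

-- ===== VERDICT (by name: the statement is the Claim_ definition above) =====
theorem unir_nombres_spec : Claim_unchanged_unir_nombres := by
  intro marcas i posicion _ _ hD
  by_cases hm : marcas = []
  · subst hm
    rw [unir_nombres, alt_eq_pvBody]
    simp [PySem.List.slice, pvBody_nil]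
  · have hi : 0 ≤ i := by
      unfold D_unir_nombres at hD
      by_contra h
      have hlen : 0 < (marcas.length : Int) := by
        cases marcas with
        | nil => exact absurd rfl hm
        | cons a l => simp
      exact hD ⟨hm, by omega, by omega⟩
    rw [alt_eq_pvBody, PySem.List.slice_from marcas hi]
    exact unir_eq_body ((marcas.length : Int) - i).toNat marcas i posicion hi rfl

theorem unir_nombres_changed : Claim_changed_unir_nombres := by
  unfold Claim_changed_unir_nombres
  refine ⟨by decide, by decide, by decide, ?_, by decide, by decide⟩
  show unir_nombres [["a"], ["b"]] (-1) 1 = "1. b\n2. a\n3. b\n"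
  rw [unir_nombres, unir_nombres, unir_nombres, unir_nombres]
  decide

theorem unir_nombres_tight : Claim_exact_unir_nombres := by
  intro marcas i posicion _ hPre hD
  obtain ⟨hne, hineg, hilt⟩ := hD
  have hlen1 : 1 ≤ (marcas.length : Int) := by
    cases marcas with
    | nil => exact absurd rfl hne
    | cons a l => simp
  have hlo : -(marcas.length : Int) ≤ i := by
    rcases hPre with h | h | h
    · exact absurd h hne
    · omega
    · rw [if_pos hineg] at h
      exact h.1
  have hA := unir_neg_eq (-i).toNat marcas i posicion (by omega) hlo rfl
  have hB : unir_nombres_alt marcas i posicion =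
      pvBody (marcas.drop ((marcas.length : Int) + i).toNat) posicion := by
    rw [alt_eq_pvBody, PySem.List.slice_some_none]
    have h1 := PySem.List.clampIdx_neg_natCast marcas.length (-i).toNat (by omega)
    have h2 : (-(((-i).toNat : Nat) : Int)) = i := by omega
    have hgi : marcas.length - (-i).toNat = ((marcas.length : Int) + i).toNat := by omega
    rw [h2] at h1
    rw [h1, hgi]
  intro hEq
  rw [hA, hB] at hEq
  have htail := pvBody_ne_empty marcas (posicion + (-i)) hne
  have h4 := congrArg String.toList hEq
  simp at h4
  rw [h4] at htail
  simp at htail
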